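-- pv_equiv track=rewrite | github.com/y10ab1/DIP | HW1/utils/util.py | Local_EQ
-- ===== SOURCE A (Python) =====
-- def Local_EQ(Ci, Cj, img, b = 3, color = 0):
--     max_intensity = 0
--     rank = 0
--     offset = (b-1)//2
--     hist = []
--     for i in range(b):
--         for j in range(b):
--             hist.append(img[Ci+i-offset][Cj+j-offset][color])
--             if img[Ci+i-offset][Cj+j-offset][color] > img[Ci][Cj][color]:
--                 continue
--             rank += 1
--     max_intensity = max(hist)
--     return (max_intensity * rank) // (b**2)
-- ===== SOURCE B (Python) =====
-- def Local_EQ(Ci, Cj, img, b = 3, color = 0):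
--     offset = (b - 1) // 2
--     window = sorted(img[Ci + i - offset][Cj + j - offset][color]
--                     for i in range(b) for j in range(b))
--     center = img[Ci][Cj][color]
--     # rank = bisect_right(window, center): first index whose value exceeds center
--     lo, hi = 0, len(window)
--     while lo < hi:
--         mid = (lo + hi) // 2
--         if center < window[mid]:
--             hi = mid
--         else:
--             lo = mid + 1
--     return (window[-1] * lo) // (b * b)
-- ===== Notes on version B (the rewrite author's own statement) =====
-- stated objective: alternative
-- what changed: B sorts the window once, reads the maximum as the last sorted element, and finds the rank by a bisect-right binary search for the center instead of counting pixels <= center during the scan.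
import Mathlib
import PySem

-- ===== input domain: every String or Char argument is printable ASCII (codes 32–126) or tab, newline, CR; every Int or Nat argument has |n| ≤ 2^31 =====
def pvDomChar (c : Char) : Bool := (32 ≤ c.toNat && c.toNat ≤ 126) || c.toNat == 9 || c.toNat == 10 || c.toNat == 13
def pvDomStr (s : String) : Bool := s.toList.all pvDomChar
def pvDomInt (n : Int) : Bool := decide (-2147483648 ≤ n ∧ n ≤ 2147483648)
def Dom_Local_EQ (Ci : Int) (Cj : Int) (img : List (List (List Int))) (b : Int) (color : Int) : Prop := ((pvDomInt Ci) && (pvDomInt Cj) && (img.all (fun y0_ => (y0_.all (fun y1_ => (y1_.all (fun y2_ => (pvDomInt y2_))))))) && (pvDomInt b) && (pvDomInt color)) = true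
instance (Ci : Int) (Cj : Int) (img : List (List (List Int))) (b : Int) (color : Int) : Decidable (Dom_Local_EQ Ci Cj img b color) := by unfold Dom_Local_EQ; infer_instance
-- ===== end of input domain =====

-- B sorts the window once, takes the max as the last sorted element and finds the rank by a bisect-right binary search; alternative algorithm (sort + binary search vs single counting pass).


-- chained Python indexing img[r][c][color]; none exactly where Python raises IndexError
def pvPix? (img : List (List (List Int))) (r c color : Int) : Option Int :=
  (PySem.List.pyGet? img r).bind (fun row =>
    (PySem.List.pyGet? row c).bind (fun px => PySem.List.pyGet? px color))

-- ===== PORT A =====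
def Local_EQ (Ci : Int) (Cj : Int) (img : List (List (List Int))) (b : Int) (color : Int) : Int :=
  let offset := PySem.Int.floordiv (b - 1) 2
  let center := (pvPix? img Ci Cj color).getD 0
  let st := (PySem.List.pyRange 0 b 1).foldl (fun (s : List Int × Int) i =>
      (PySem.List.pyRange 0 b 1).foldl (fun (s : List Int × Int) j =>
        let v := (pvPix? img (Ci + i - offset) (Cj + j - offset) color).getD 0
        let hist := s.1 ++ [v]
        if v > center then (hist, s.2) else (hist, s.2 + 1)) s) ([], 0)
  let max_intensity := (PySem.List.max? st.1 (fun x => x)).getD 0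
  PySem.Int.floordiv (max_intensity * st.2) (b ^ 2)

-- ===== PORT B =====
-- Source B's hand-written lo/hi loop is exactly bisect_right; PySem.List.bisectRight is that
-- same lo/hi halving loop step for step (mid = (lo+hi)//2, 'center < window[mid]' branch).
def Local_EQ_alt (Ci : Int) (Cj : Int) (img : List (List (List Int))) (b : Int) (color : Int) : Int :=
  let offset := PySem.Int.floordiv (b - 1) 2
  let window := PySem.List.sorted
    ((PySem.List.pyRange 0 b 1).flatMap (fun i =>
      (PySem.List.pyRange 0 b 1).map (fun j =>
        (pvPix? img (Ci + i - offset) (Cj + j - offset) color).getD 0)))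
    (fun x => x) false
  let center := (pvPix? img Ci Cj color).getD 0
  let lo : Int := (PySem.List.bisectRight window center : Nat)
  PySem.Int.floordiv (((PySem.List.pyGet? window (-1)).getD 0) * lo) (b * b)

-- ===== PRECONDITION & SPEC =====
-- Pre_ excludes exactly the inputs where the Python raises: b ≤ 0 (A: max([]) ValueError, B: window[-1] IndexError)
-- and any window or center access out of range (IndexError; negative in-range indices wrap and are admitted).
def Pre_Local_EQ (Ci : Int) (Cj : Int) (img : List (List (List Int))) (b : Int) (color : Int) : Prop :=
  1 ≤ b ∧ (pvPix? img Ci Cj color).isSome = true ∧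
  ∀ i ∈ PySem.List.pyRange 0 b 1, ∀ j ∈ PySem.List.pyRange 0 b 1,
    (pvPix? img (Ci + i - PySem.Int.floordiv (b - 1) 2)
              (Cj + j - PySem.Int.floordiv (b - 1) 2) color).isSome = true
instance (Ci : Int) (Cj : Int) (img : List (List (List Int))) (b : Int) (color : Int) : Decidable (Pre_Local_EQ Ci Cj img b color) := by unfold Pre_Local_EQ; infer_instance

def pvWitness_Local_EQ : Int × Int × List (List (List Int)) × Int × Int := (1, 1, [[[1], [2], [3]], [[4], [5], [6]], [[7], [8], [9]]], 3, 0)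

def Spec_Local_EQ (Ci : Int) (Cj : Int) (img : List (List (List Int))) (b : Int) (color : Int) (out : Int) : Prop := out = Local_EQ_alt Ci Cj img b color
instance (Ci : Int) (Cj : Int) (img : List (List (List Int))) (b : Int) (color : Int) (out : Int) : Decidable (Spec_Local_EQ Ci Cj img b color out) := by unfold Spec_Local_EQ; infer_instance

-- ===== CLAIM (what is proved, stated in full; the proofs are below) =====
def Claim_equal_Local_EQ : Prop := ∀ (Ci : Int) (Cj : Int) (img : List (List (List Int))) (b : Int) (color : Int), Dom_Local_EQ Ci Cj img b color → Pre_Local_EQ Ci Cj img b color → Spec_Local_EQ Ci Cj img b color (Local_EQ Ci Cj img b color)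

-- ===== LEMMAS AND PROOFS =====

-- A's nested loop: hist is every window value in traversal order, rank counts values ≤ center
theorem stA (rng : List Int) (pix : Int → Int → Int) (center : Int) :
    rng.foldl (fun (s : List Int × Int) i =>
      rng.foldl (fun (s : List Int × Int) j =>
        if pix i j > center then (s.1 ++ [pix i j], s.2) else (s.1 ++ [pix i j], s.2 + 1)) s)
      (([] : List Int), (0 : Int))
    = (rng.flatMap (fun i => rng.map (fun j => pix i j)),
       ((rng.flatMap (fun i => rng.map (fun j => pix i j))).countP (fun v => decide (v ≤ center)) : Int)) := by
  have hinner : ∀ (i : Int) (s : List Int × Int),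
      rng.foldl (fun (s : List Int × Int) j =>
        if pix i j > center then (s.1 ++ [pix i j], s.2) else (s.1 ++ [pix i j], s.2 + 1)) s
      = (rng.foldl (fun s1 j => s1 ++ [pix i j]) s.1,
         rng.foldl (fun s2 j => if pix i j ≤ center then s2 + (1:Int) else s2) s.2) := by
    intro i s
    have h1 : (fun (s : List Int × Int) (j : Int) =>
        if pix i j > center then (s.1 ++ [pix i j], s.2) else (s.1 ++ [pix i j], s.2 + 1))
        = fun (s : List Int × Int) (j : Int) =>
          (s.1 ++ [pix i j], if pix i j ≤ center then s.2 + (1:Int) else s.2) := by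
      funext s j
      by_cases h : pix i j > center
      · simp only [h, if_pos, if_neg (by omega : ¬ pix i j ≤ center)]
      · simp only [if_neg h, if_pos (by omega : pix i j ≤ center)]
    rw [h1, ← Prod.mk.eta (p := s)]
    exact PySem.List.foldl_prod_mk
      (fun s1 j => s1 ++ [pix i j])
      (fun s2 j => if pix i j ≤ center then s2 + (1:Int) else s2) rng s.1 s.2
  have houter : (fun (s : List Int × Int) (i : Int) =>
      rng.foldl (fun (s : List Int × Int) j =>
        if pix i j > center then (s.1 ++ [pix i j], s.2) else (s.1 ++ [pix i j], s.2 + 1)) s)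
      = fun (s : List Int × Int) (i : Int) =>
        (rng.foldl (fun s1 j => s1 ++ [pix i j]) s.1,
         rng.foldl (fun s2 j => if pix i j ≤ center then s2 + (1:Int) else s2) s.2) := by
    funext s i; exact hinner i s
  rw [houter]
  rw [PySem.List.foldl_prod_mk
      (fun s1 i => rng.foldl (fun s1 j => s1 ++ [pix i j]) s1)
      (fun s2 i => rng.foldl (fun s2 j => if pix i j ≤ center then s2 + (1:Int) else s2) s2) rng [] 0]
  have hh : rng.foldl (fun s1 i => rng.foldl (fun s1 j => s1 ++ [pix i j]) s1) []
      = rng.flatMap (fun i => rng.map (fun j => pix i j)) := by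
    have hmap : (fun (s1 : List Int) (i : Int) => rng.foldl (fun s1 j => s1 ++ [pix i j]) s1)
        = fun s1 i => s1 ++ rng.map (fun j => pix i j) := by
      funext s1 i; rw [PySem.List.foldl_append_singleton_eq_map]
    rw [hmap, PySem.List.foldl_append_eq_flatMap]
    simp
  have hr : rng.foldl (fun s2 i => rng.foldl (fun s2 j => if pix i j ≤ center then s2 + (1:Int) else s2) s2) 0
      = ((rng.flatMap (fun i => rng.map (fun j => pix i j))).countP (fun v => decide (v ≤ center)) : Int) := by
    have hcnt : (fun (s2 : Int) (i : Int) => rng.foldl (fun s2 j => if pix i j ≤ center then s2 + (1:Int) else s2) s2)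
        = fun s2 i => s2 + ((rng.map (fun j => pix i j)).countP (fun v => decide (v ≤ center)) : Int) := by
      funext s2 i
      have h := PySem.List.foldl_ite_add_one (fun j => pix i j ≤ center) rng s2
      rw [h, List.countP_map]
      rfl
    rw [hcnt]
    rw [PySem.List.foldl_add (g := fun i => ((rng.map (fun j => pix i j)).countP (fun v => decide (v ≤ center)) : Int))]
    rw [List.countP_flatMap]
    push_cast
    rw [zero_add, List.map_map]
    apply congrArg List.sum
    apply List.map_congr_left
    intro i _
    simp [Function.comp_def, List.countP_map]
  rw [hh, hr]

-- a list whose first r entries satisfy (· ≤ c) and whose remaining entries exceed c has countP = r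
theorem countP_index (c : Int) : ∀ (xs : List Int) (r : Nat), r ≤ xs.length →
    (∀ j (hj : j < xs.length), j < r → xs[j] ≤ c) →
    (∀ j (hj : j < xs.length), r ≤ j → c < xs[j]) →
    xs.countP (fun v => decide (v ≤ c)) = r := by
  intro xs
  induction xs with
  | nil => intro r hr _ _; simp only [List.length_nil, Nat.le_zero] at hr; simp [hr]
  | cons x t ih =>
      intro r hr h1 h2
      cases r with
      | zero =>
          have hx : c < x := h2 0 (by simp) (by omega)
          rw [List.countP_cons]
          have ht : t.countP (fun v => decide (v ≤ c)) = 0 := by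
            apply ih 0 (by omega)
            · intro j hj hj0; omega
            · intro j hj _
              have := h2 (j+1) (by simpa using Nat.succ_lt_succ hj) (by omega)
              simpa using this
          simp [ht, not_le.mpr hx]
      | succ r' =>
          have hx : x ≤ c := h1 0 (by simp) (by omega)
          rw [List.countP_cons]
          have ht : t.countP (fun v => decide (v ≤ c)) = r' := by
            apply ih r' (by simpa using hr)
            · intro j hj hjr
              have := h1 (j+1) (by simpa using Nat.succ_lt_succ hj) (by omega)
              simpa using this
            · intro j hj hjr
              have := h2 (j+1) (by simpa using Nat.succ_lt_succ hj) (by omega)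
              simpa using this
          simp [ht, hx]

-- bisect_right on the sorted window counts the values ≤ center of the original list
theorem bisect_sorted_eq_countP (xs : List Int) (c : Int) :
    PySem.List.bisectRight (PySem.List.sorted xs (fun x => x) false) c
      = xs.countP (fun v => decide (v ≤ c)) := by
  set ws := PySem.List.sorted xs (fun x => x) false with hws
  have hp : ws.Pairwise (fun a b => a ≤ b) := by
    have := PySem.List.sorted_pairwise xs (fun x => x)
    simpa [hws] using this
  obtain ⟨hle, hlt, hgt⟩ := PySem.List.bisectRight_spec ws c hp
  have hcnt : ws.countP (fun v => decide (v ≤ c)) = PySem.List.bisectRight ws c :=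
    countP_index c ws _ hle hlt hgt
  have hperm : ws.Perm xs := PySem.List.sorted_perm xs (fun x => x) false
  rw [← hperm.countP_eq, hcnt]

-- the last element of the sorted list is the max of the original list (0 default on empty)
theorem last_sorted_eq_max (xs : List Int) :
    (PySem.List.pyGet? (PySem.List.sorted xs (fun x => x) false) (-1)).getD 0
      = (PySem.List.max? xs (fun x => x)).getD 0 := by
  by_cases hnil : xs = []
  · subst hnil; decide
  · set ws := PySem.List.sorted xs (fun x => x) false with hws
    have hwnil : ws ≠ [] := by
      intro h
      exact hnil ((PySem.List.sorted_eq_nil_iff xs (fun x => x) false).mp (hws ▸ h))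
    have hlast : PySem.List.pyGet? ws (-1) = some (ws.getLast hwnil) := by
      rw [PySem.List.pyGet?_neg_one, List.getLast?_eq_some_getLast hwnil]
    set m := ws.getLast hwnil with hm
    have hmmem : m ∈ xs := by
      have : m ∈ ws := List.getLast_mem hwnil
      exact (PySem.List.mem_sorted xs (fun x => x) false m).mp (hws ▸ this)
    have hmax : ∀ y ∈ ws, y ≤ m := by
      intro y hy
      obtain ⟨j, hj, hjy⟩ := List.mem_iff_getElem.mp hy
      have hq : ws.length - 1 < ws.length := by
        have := List.length_pos_iff.mpr hwnil; omega
      have hmono := PySem.List.key_sorted_getElem_mono (xs := xs) (key := fun x => x)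
        (p := j) (q := ws.length - 1) (by omega) (by simpa [← hws] using hq)
      rw [hm, List.getLast_eq_getElem]
      simp only [← hws] at hmono
      simpa [hjy] using hmono
    cases hmx : PySem.List.max? xs (fun x => x) with
    | none =>
        exact absurd ((PySem.List.max?_eq_none_iff xs (fun x => x)).mp hmx) hnil
    | some m' =>
        have hm'x : m' ∈ xs := PySem.List.max?_mem hmx
        have hm'ws : m' ∈ ws := (PySem.List.mem_sorted xs (fun x => x) false m').mpr hm'x
        have h1 : m ≤ m' := PySem.List.max?_isMax hmx m hmmem
        have h2 : m' ≤ m := hmax m' hm'ws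
        rw [hlast]
        simp [le_antisymm h1 h2]

theorem main_eq (Ci Cj : Int) (img : List (List (List Int))) (b color : Int) :
    Local_EQ Ci Cj img b color = Local_EQ_alt Ci Cj img b color := by
  simp only [Local_EQ, Local_EQ_alt]
  rw [stA (PySem.List.pyRange 0 b)
        (fun i j => (pvPix? img (Ci + i - PySem.Int.floordiv (b - 1) 2)
                              (Cj + j - PySem.Int.floordiv (b - 1) 2) color).getD 0)
        ((pvPix? img Ci Cj color).getD 0)]
  rw [bisect_sorted_eq_countP, last_sorted_eq_max, pow_two]

-- ===== VERDICT (by name: the statement is the Claim_ definition above) =====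
theorem Local_EQ_spec : Claim_equal_Local_EQ := by
  intro Ci Cj img b color _ _
  unfold Spec_Local_EQ
  exact main_eq Ci Cj img b color
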